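-- pv_equiv track=rewrite | github.com/bonkach/Advent-of-Code-2020 | 3b.py | tobogan
-- ===== SOURCE A (Python) =====
-- def tobogan(i, sve, preskok):
--     put = i
--     brojač = 0
--     if preskok == 0:
--         korak = 1
--     else:
--         korak = preskok
--     for j in range(preskok, len(sve), korak):
--         red = sve[j].strip()
--         red = list(red)
--         while len(red) <= put:
--             red += red
--         if red[put] == '#':
--             brojač += 1
--             red[put] = 'X'
--         else:
--             red[put] = '0'
--         put += i
--     return brojač
-- ===== SOURCE B (Python) =====
-- def tobogan(i, sve, preskok):
--     korak = preskok if preskok != 0 else 1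
--     rows = [sve[j].strip() for j in range(preskok, len(sve), korak)]
--     return sum(1 for k, red in enumerate(rows, 1) if red[(i * k) % len(red)] == '#')
-- ===== Notes on version B (the rewrite author's own statement) =====
-- stated objective: alternative
-- what changed: B replaces A's stateful loop (running offset put, doubling the row list until it exceeds put) by a staged pipeline: build the list of visited stripped rows once, then count over enumerate(rows, 1) the rows whose character at (i*k) % len(row) is '#'; the doubling and the mutable offset disappear.
-- outside the precondition, e.g. on tobogan(1, [''], 0): A does not finish within the time limit, B raises ZeroDivisionError; on tobogan(-3, ['##'], 0): A raises IndexError, B returns 1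
import Mathlib
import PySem

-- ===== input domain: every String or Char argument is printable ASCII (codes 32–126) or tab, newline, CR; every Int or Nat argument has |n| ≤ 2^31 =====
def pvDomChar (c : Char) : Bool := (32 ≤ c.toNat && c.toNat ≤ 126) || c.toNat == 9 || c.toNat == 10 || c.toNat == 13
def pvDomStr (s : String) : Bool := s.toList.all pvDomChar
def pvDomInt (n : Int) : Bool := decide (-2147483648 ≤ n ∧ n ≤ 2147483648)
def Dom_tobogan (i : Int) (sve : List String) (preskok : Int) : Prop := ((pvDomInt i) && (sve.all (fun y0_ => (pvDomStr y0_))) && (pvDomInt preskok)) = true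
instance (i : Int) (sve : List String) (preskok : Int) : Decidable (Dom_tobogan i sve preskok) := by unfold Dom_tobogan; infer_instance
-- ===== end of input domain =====

-- B replaces A's stateful loop (running offset 'put', doubling the row list until it is
-- longer than put) by a staged pipeline: build the list of visited stripped rows once,
-- then count, over enumerate(rows, 1), the rows whose character at (i*k) % len(row) is
-- '#' (objective: alternative — the row-doubling and the mutable offset disappear).

-- ===== PORT A =====
-- the stripped row sve[j] as a list of chars (sve[j] is always in range on visited j)
def toboganRow (sve : List String) (j : Int) : List Char :=
  (PySem.Str.strip ((PySem.List.pyGet? sve j).getD "")).toList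

-- A's 'while len(red) <= put: red += red', with enough fuel to reach len(red) > put
def toboganDouble (put : Int) : Nat → List Char → List Char
  | 0, red => red
  | fuel + 1, red => if (red.length : Int) ≤ put then toboganDouble put fuel (red ++ red) else red

def toboganStepA (i : Int) (sve : List String) (st : Int × Int) (j : Int) : Int × Int :=
  let put := st.1
  let red := toboganDouble put (put.toNat + 1) (toboganRow sve j)
  -- the writes red[put] = 'X' / '0' of A are to a list local to the iteration: dropped
  let b := match PySem.List.pyGet? red put with
    | some c => if c = '#' then st.2 + 1 else st.2
    | none => st.2            -- A raises IndexError here; excluded by Pre_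
  (put + i, b)

def tobogan (i : Int) (sve : List String) (preskok : Int) : Int :=
  let korak := if preskok = 0 then 1 else preskok
  ((PySem.List.pyRange preskok sve.length korak).foldl (toboganStepA i sve) (i, 0)).2

-- ===== PORT B =====
-- red[pos % len(red)] == '#'  (on Pre_ the row is nonempty, so the lookup is in range)
def toboganHitAt (pos : Int) (red : List Char) : Bool :=
  (PySem.List.pyGet? red (PySem.Int.mod pos red.length)).getD ' ' == '#'

def tobogan_alt (i : Int) (sve : List String) (preskok : Int) : Int :=
  let korak := if preskok = 0 then 1 else preskok
  let rows := (PySem.List.pyRange preskok sve.length korak).map (toboganRow sve)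
  ((PySem.List.enumerate rows 1).countP (fun p => toboganHitAt (i * p.1) p.2) : Int)

-- ===== PRECONDITION & SPEC =====
-- Pre_ = exactly the inputs where A terminates normally: every visited stripped row is
-- nonempty (A's doubling loop diverges on an empty row for put ≥ 0) and the running index
-- put = i*(k+1) is ≥ -len(row) when negative (else A's red[put] raises IndexError).
def Pre_tobogan (i : Int) (sve : List String) (preskok : Int) : Prop :=
  let L := PySem.List.pyRange preskok sve.length (if preskok = 0 then 1 else preskok)
  ∀ k, k < L.length →
    0 < (toboganRow sve (L.getD k 0)).length ∧
      -((toboganRow sve (L.getD k 0)).length : Int) ≤ i * (k + 1)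
instance (i : Int) (sve : List String) (preskok : Int) : Decidable (Pre_tobogan i sve preskok) := by
  unfold Pre_tobogan; infer_instance

def pvWitness_tobogan : Int × List String × Int := (3, ["..##.......", "#...#...#..", ".#....#..#.", "..#.#...#.#"], 1)

def Spec_tobogan (i : Int) (sve : List String) (preskok : Int) (out : Int) : Prop := out = tobogan_alt i sve preskok
instance (i : Int) (sve : List String) (preskok : Int) (out : Int) : Decidable (Spec_tobogan i sve preskok out) := by unfold Spec_tobogan; infer_instance

-- ===== CLAIM (what is proved, stated in full; the proofs are below) =====
def Claim_equal_tobogan : Prop := ∀ (i : Int) (sve : List String) (preskok : Int), Dom_tobogan i sve preskok → Pre_tobogan i sve preskok → Spec_tobogan i sve preskok (tobogan i sve preskok)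

-- ===== LEMMAS AND PROOFS =====

-- the doubled list indexed at put ≥ 0 reads the original row modulo its width
theorem toboganDouble_pyGet (red : List Char) (put : Int) (h0 : 0 ≤ put) :
    ∀ (fuel : Nat) (cur : List Char), (∃ q : Nat, cur.length = red.length * q) →
      (∀ t : Nat, t < cur.length → cur[t]? = red[t % red.length]?) →
      put < (cur.length : Int) * 2 ^ fuel →
      PySem.List.pyGet? (toboganDouble put fuel cur) put = red[put.toNat % red.length]? := by
  intro fuel
  induction fuel with
  | zero =>
    intro cur hmod hget hlt
    simp only [toboganDouble]
    rw [PySem.List.pyGet?_of_nonneg cur h0]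
    have hlt' : put < (cur.length : Int) := by simpa using hlt
    exact hget put.toNat (by omega)
  | succ fuel ih =>
    intro cur hmod hget hlt
    obtain ⟨q, hq⟩ := hmod
    simp only [toboganDouble]
    split_ifs with hle
    · apply ih (cur ++ cur)
      · exact ⟨2 * q, by simp only [List.length_append]; rw [hq]; ring⟩
      · intro t ht
        simp only [List.length_append] at ht
        rcases lt_or_ge t cur.length with h | h
        · rw [List.getElem?_append_left h]; exact hget t h
        · rw [List.getElem?_append_right h, hget (t - cur.length) (by omega)]
          congr 1
          have e := Nat.add_mul_mod_self_right (t - cur.length) q red.length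
          rw [show t - cur.length + q * red.length = t from by rw [Nat.mul_comm]; omega] at e
          exact e.symm
      · simp only [List.length_append]
        have e : ((cur.length : Int) + cur.length) * 2 ^ fuel
            = (cur.length : Int) * (2 ^ fuel * 2) := by ring
        rw [pow_succ] at hlt
        push_cast
        linarith
    · rw [PySem.List.pyGet?_of_nonneg cur h0]
      exact hget put.toNat (by omega)

-- A's lookup in the doubled row equals B's original-row lookup at put % width
theorem pyGet_double_eq_mod (row : List Char) (put : Int)
    (h1 : 0 < row.length) (h2 : -(row.length : Int) ≤ put) :
    PySem.List.pyGet? (toboganDouble put (put.toNat + 1) row) put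
      = PySem.List.pyGet? row (PySem.Int.mod put row.length) := by
  rcases lt_or_ge put 0 with hneg | hpos
  · -- -len ≤ put < 0: no doubling happens and row[put] = row[put % len] = row[put + len]
    have hfuel : put.toNat + 1 = 1 := by omega
    have hA : toboganDouble put (put.toNat + 1) row = row := by
      rw [hfuel]
      simp only [toboganDouble]
      rw [if_neg (by omega)]
    have hB : PySem.Int.mod put (row.length : Int) = put + row.length := by
      rw [PySem.Int.mod_eq_emod_of_pos (by exact_mod_cast h1)]
      have e1 : (put + (row.length : Int) * 1) % (row.length : Int) = put % row.length :=
        Int.add_mul_emod_self_left put (row.length : Int) 1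
      rw [mul_one] at e1
      rw [← e1]
      exact Int.emod_eq_of_lt (by omega) (by omega)
    rw [hA, hB]
    set k : Nat := (-put).toNat with hk
    have hget1 : PySem.List.pyGet? row put = row[row.length - k]? := by
      rw [show put = -((k : Nat) : Int) by omega]
      exact PySem.List.pyGet?_neg_natCast row k (by omega) (by omega)
    have hget2 : PySem.List.pyGet? row (put + row.length) = row[row.length - k]? := by
      rw [PySem.List.pyGet?_of_nonneg row (by omega)]
      congr 1
      omega
    rw [hget1, hget2]
  · -- put ≥ 0: the doubled row at put reads row[put % len]
    have hA : PySem.List.pyGet? (toboganDouble put (put.toNat + 1) row) put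
        = row[put.toNat % row.length]? := by
      apply toboganDouble_pyGet row put hpos
      · exact ⟨1, (Nat.mul_one _).symm⟩
      · intro t ht; rw [Nat.mod_eq_of_lt ht]
      · have hp : put.toNat < 2 ^ put.toNat := Nat.lt_two_pow_self
        have h2le : (2:Int) ^ put.toNat ≤ (2:Int) ^ (put.toNat + 1) := by
          apply pow_le_pow_right₀ <;> omega
        have hl : (1:Int) * 2 ^ (put.toNat + 1) ≤ (row.length : Int) * 2 ^ (put.toNat + 1) := by
          apply mul_le_mul_of_nonneg_right (by exact_mod_cast h1) (by positivity)
        have : put < (2:Int) ^ put.toNat := by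
          calc put = (put.toNat : Int) := by omega
          _ < (2:Int) ^ put.toNat := by exact_mod_cast hp
        linarith
    have hB : PySem.Int.mod put (row.length : Int) = ((put.toNat % row.length : Nat) : Int) := by
      rw [PySem.Int.mod_eq_emod_of_pos (by exact_mod_cast h1)]
      rw [show put = ((put.toNat : Nat) : Int) from by omega]
      push_cast
      rfl
    rw [hA, hB, PySem.List.pyGet?_natCast]

-- one iteration of A's loop, written with B's hit test
theorem stepA_eq (i : Int) (sve : List String) (j put b : Int)
    (h1 : 0 < (toboganRow sve j).length)
    (h2 : -((toboganRow sve j).length : Int) ≤ put) :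
    toboganStepA i sve (put, b) j
      = (put + i, if toboganHitAt put (toboganRow sve j) then b + 1 else b) := by
  simp only [toboganStepA, toboganHitAt]
  set row := toboganRow sve j with hrow
  rw [pyGet_double_eq_mod row put h1 h2]
  have hin : PySem.Int.mod put (row.length : Int) < (row.length : Int) ∧
      0 ≤ PySem.Int.mod put (row.length : Int) :=
    ⟨PySem.Int.mod_lt put (by exact_mod_cast h1), PySem.Int.mod_nonneg put (by exact_mod_cast h1)⟩
  obtain ⟨c, hc⟩ : ∃ c, PySem.List.pyGet? row (PySem.Int.mod put (row.length : Int)) = some c := by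
    rw [PySem.List.pyGet?_of_nonneg row hin.2]
    have : (PySem.Int.mod put (row.length : Int)).toNat < row.length := by omega
    exact ⟨row[(PySem.Int.mod put (row.length : Int)).toNat], List.getElem?_eq_getElem this⟩
  simp only [hc, Option.getD_some]
  by_cases hcc : c = '#' <;> simp [hcc]

-- A's fold over the visited indices counts exactly B's hits, with enumerate start s and put = i*s
set_option maxHeartbeats 1000000 in
theorem fold_count (i : Int) (sve : List String) :
    ∀ (L : List Int) (s b : Int),
      (∀ k, k < L.length →
        0 < (toboganRow sve (L.getD k 0)).length ∧
          -((toboganRow sve (L.getD k 0)).length : Int) ≤ i * (s + k)) →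
      (L.foldl (toboganStepA i sve) (i * s, b)).2
        = b + ((PySem.List.enumerate (L.map (toboganRow sve)) s).countP
                (fun p => toboganHitAt (i * p.1) p.2) : Int) := by
  intro L
  induction L with
  | nil => intro s b _; simp [PySem.List.enumerate_nil]
  | cons j L ih =>
    intro s b h
    have h0 := h 0 (by simp)
    simp only [List.getD_cons_zero, Nat.cast_zero, add_zero] at h0
    have hh : ∀ k, k < L.length →
        0 < (toboganRow sve (L.getD k 0)).length ∧
          -((toboganRow sve (L.getD k 0)).length : Int) ≤ i * (s + 1 + k) := by
      intro k hk
      have hs := h (k + 1) (by simpa using hk)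
      simp only [List.getD_cons_succ] at hs
      refine ⟨hs.1, ?_⟩
      have h2 := hs.2
      push_cast at h2 ⊢
      have e : i * (s + ((k : Int) + 1)) = i * (s + 1 + k) := by ring
      linarith [h2, le_of_eq e]
    simp only [List.foldl_cons, List.map_cons]
    rw [stepA_eq i sve j (i * s) b h0.1 h0.2,
        show i * s + i = i * (s + 1) from by ring,
        ih (s + 1) _ hh, PySem.List.enumerate_cons, List.countP_cons,
        Nat.cast_add, apply_ite (fun n : Nat => (n : Int))]
    simp only [Nat.cast_one, Nat.cast_zero]
    split_ifs <;> ring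

-- ===== VERDICT (by name: the statement is the Claim_ definition above) =====
theorem tobogan_spec : Claim_equal_tobogan := by
  intro i sve preskok _ hpre
  unfold Spec_tobogan tobogan tobogan_alt
  have h' := fold_count i sve
      (PySem.List.pyRange preskok sve.length (if preskok = 0 then 1 else preskok)) 1 0 ?_
  · rw [mul_one, zero_add] at h'
    exact h'
  · intro k hk
    have := hpre k hk
    refine ⟨this.1, ?_⟩
    have h2 := this.2
    have e : i * (1 + (k : Int)) = i * ((k : Int) + 1) := by ring
    rw [e]
    exact h2
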